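-- pv_equiv track=rewrite | github.com/shhuan1989/algorithms | codeforces/126B.py | solve_prefix
-- ===== SOURCE A (Python) =====
-- def solve_prefix(s):
--     """
--     https://cp-algorithms.com/string/prefix-function.html
--     The prefix function for this string is defined as an array π of length n,
--     where π[i] is the length of the longest proper prefix of the substring s[0…i]
--     which is also a suffix of this substring.
--     A proper prefix of a string is a prefix that is not equal to the string itself. By definition, π[0]=0.
--     """
--     n, pi = len(s), [0] * len(s)
--     for i in range(1, n):
--         j = pi[i-1]
--         while j > 0 and s[i] != s[j]:
--             j = pi[j-1]
--         if s[i] == s[j]: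
--             j += 1
--         pi[i] = j
--
--     if pi[-1] > 0:
--         if any([pi[i] >= pi[-1] for i in range(n - 1)]):
--             return s[:pi[-1]]
--         else:
--             p = pi[pi[-1] - 1]
--             if p > 0:
--                 return s[:p]
--     return 'Just a legend'
-- ===== SOURCE B (Python) =====
-- def solve_prefix(s):
--     # Direct search: try each candidate border length L from longest to shortest;
--     # L qualifies if s[:L] is a proper suffix of s and also occurs somewhere strictly inside.
--     n = len(s)
--     for L in range(n - 1, 0, -1):
--         if s[:L] == s[n - L:] and any(s[j:j + L] == s[:L] for j in range(1, n - L)):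
--             return s[:L]
--     return 'Just a legend'
-- ===== Notes on version B (the rewrite author's own statement) =====
-- stated objective: simpler
-- what changed: Replaces the KMP prefix-function array and its border-chain fallback logic with a direct descending search over candidate border lengths L, returning the first L whose prefix equals the suffix and also occurs strictly inside the string.
import Mathlib
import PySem

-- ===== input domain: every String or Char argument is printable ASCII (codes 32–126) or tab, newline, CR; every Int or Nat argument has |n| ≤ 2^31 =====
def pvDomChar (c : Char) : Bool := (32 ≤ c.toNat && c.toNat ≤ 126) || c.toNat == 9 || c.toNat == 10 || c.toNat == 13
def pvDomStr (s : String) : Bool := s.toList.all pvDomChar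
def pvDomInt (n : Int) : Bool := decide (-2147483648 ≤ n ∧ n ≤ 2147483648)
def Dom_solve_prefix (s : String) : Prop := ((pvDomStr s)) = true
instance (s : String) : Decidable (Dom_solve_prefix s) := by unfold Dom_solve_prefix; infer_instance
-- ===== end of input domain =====

-- B replaces A's KMP prefix-function array and fallback chain by a direct descending
-- search over candidate border lengths (objective: simpler); return values agree on
-- every non-empty string, and where A raises IndexError (empty string) B returns 'Just a legend'.


-- ===== PORT A =====
-- `while j > 0 and s[i] != s[j]: j = pi[j-1]` — ported with fuel; exact for A's runs because
-- there every pi[k] ≤ k, so j strictly decreases and the initial value of j is enough fuel.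
def kmpWhile (cs : List Char) (pi : List Int) (c : Char) : Nat → Int → Int
  | 0, j => j
  | fuel+1, j =>
    if j > 0 && cs.getD j.toNat ' ' != c then
      kmpWhile cs pi c fuel (pi.getD (j.toNat - 1) 0)
    else j

-- body of `for i in range(1, n)`; all indices are in range in A's runs, so getD is exact
def kmpStep (cs : List Char) (pi : List Int) (i : Nat) : List Int :=
  let c := cs.getD i ' '
  let j0 := pi.getD (i - 1) 0
  let j1 := kmpWhile cs pi c j0.toNat j0
  let j2 := if cs.getD j1.toNat ' ' = c then j1 + 1 else j1
  pi.set i j2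

def solve_prefix (s : String) : String :=
  let cs := s.toList
  let n := cs.length
  let pi := (List.range' 1 (n - 1)).foldl (kmpStep cs) (List.replicate n 0)
  let last := pi.getD (n - 1) 0   -- pi[-1]; Pre_ excludes the empty string, where Python raises IndexError here
  if last > 0 then
    if (List.range (n - 1)).any (fun i => pi.getD i 0 ≥ last) then
      String.ofList (cs.take last.toNat)
    else
      let p := pi.getD (last.toNat - 1) 0
      if p > 0 then String.ofList (cs.take p.toNat) else "Just a legend"
  else "Just a legend"

-- ===== PORT B =====
-- `s[:L] == s[n-L:] and any(s[j:j+L] == s[:L] for j in range(1, n-L))`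
def altOk (cs : List Char) (n L : Nat) : Bool :=
  (cs.take L == cs.drop (n - L)) &&
    (List.range' 1 (n - L - 1)).any (fun j => (cs.drop j).take L == cs.take L)

-- `for L in range(n-1, 0, -1): if ok: return s[:L]` as find? over the descending lengths
def solve_prefix_alt (s : String) : String :=
  let cs := s.toList
  let n := cs.length
  match (List.range' 1 (n - 1)).reverse.find? (altOk cs n) with
  | some L => String.ofList (cs.take L)
  | none => "Just a legend"

-- ===== PRECONDITION & SPEC =====
-- Pre_ excludes only the empty string, on which A raises IndexError (pi[-1] on an empty list).
def Pre_solve_prefix (s : String) : Prop := s ≠ ""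
instance (s : String) : Decidable (Pre_solve_prefix s) := by unfold Pre_solve_prefix; infer_instance
def pvWitness_solve_prefix : String := "aabaa"

def Spec_solve_prefix (s : String) (out : String) : Prop := out = solve_prefix_alt s
instance (s : String) (out : String) : Decidable (Spec_solve_prefix s out) := by unfold Spec_solve_prefix; infer_instance

-- ===== CLAIM (what is proved, stated in full; the proofs are below) =====
def Claim_equal_solve_prefix : Prop := ∀ (s : String), Dom_solve_prefix s → Pre_solve_prefix s → Spec_solve_prefix s (solve_prefix s)

-- ===== LEMMAS AND PROOFS =====

-- `IsB t L`: L is the length of a proper border of t (prefix of length L = suffix of length L)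
abbrev IsB (t : List Char) (L : Nat) : Prop := L < t.length ∧ t.take L = t.drop (t.length - L)

-- length of the longest proper border
def lb (t : List Char) : Nat := Nat.findGreatest (IsB t) (t.length - 1)

theorem isB_zero (t : List Char) (h : 0 < t.length) : IsB t 0 := by
  refine ⟨h, ?_⟩
  simp

theorem isB_lift {t : List Char} {b c : Nat} (hb : IsB (t.take c) b) (hc : IsB t c) :
    IsB t b := by
  obtain ⟨hblt, hbeq⟩ := hb
  obtain ⟨hclt, hceq⟩ := hc
  have hlen : (t.take c).length = c := by simp [List.length_take]; omega
  rw [hlen] at hblt hbeq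
  refine ⟨by omega, ?_⟩
  have h1 : t.take b = (t.take c).take b := by rw [List.take_take]; congr 1; omega
  have h2 : (t.take c).drop (c - b) = (t.drop (t.length - c)).drop (c - b) := by rw [hceq]
  have h3 : (t.drop (t.length - c)).drop (c - b) = t.drop (t.length - b) := by
    rw [List.drop_drop]; congr 1; omega
  rw [h1, hbeq, h2, h3]

theorem isB_restrict {t : List Char} {b c : Nat} (hb : IsB t b) (hc : IsB t c)
    (hbc : b < c) : IsB (t.take c) b := by
  obtain ⟨hblt, hbeq⟩ := hb
  obtain ⟨hclt, hceq⟩ := hc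
  have hlen : (t.take c).length = c := by simp [List.length_take]; omega
  refine ⟨by omega, ?_⟩
  rw [hlen]
  have h1 : (t.take c).take b = t.take b := by rw [List.take_take]; congr 1; omega
  have h2 : (t.take c).drop (c - b) = t.drop (t.length - b) := by
    rw [hceq, List.drop_drop]; congr 1; omega
  rw [h1, h2, hbeq]

theorem lb_isB {t : List Char} (h : 0 < t.length) : IsB t (lb t) :=
  Nat.findGreatest_spec (Nat.zero_le _) (isB_zero t h)

theorem lb_ge {t : List Char} {b : Nat} (hb : IsB t b) : b ≤ lb t :=
  Nat.le_findGreatest (by have := hb.1; omega) hb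

theorem lb_le (t : List Char) : lb t ≤ t.length - 1 := Nat.findGreatest_le _

theorem lb_eq {t : List Char} {m : Nat} (hm : IsB t m) (hmax : ∀ b, IsB t b → b ≤ m) :
    lb t = m := by
  have h0 : 0 < t.length := by have := hm.1; omega
  exact Nat.le_antisymm (hmax _ (lb_isB h0)) (lb_ge hm)

-- getD on a take agrees with getD on the list
theorem getD_take {t : List Char} {i k : Nat} (h : i < k) (hk : k ≤ t.length) :
    (t.take k).getD i ' ' = t.getD i ' ' := by
  have h1 : i < (t.take k).length := by simp [List.length_take]; omega
  rw [List.getD_eq_getElem _ _ h1, List.getD_eq_getElem _ _ (by omega), List.getElem_take]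

-- appending one character: borders of t ++ [c]
theorem isB_snoc_intro {t : List Char} {b : Nat} {c : Char}
    (hb : IsB t b) (hc : t.getD b ' ' = c) : IsB (t ++ [c]) (b + 1) := by
  obtain ⟨hlt, heq⟩ := hb
  refine ⟨by simp; omega, ?_⟩
  have hlen : (t ++ [c]).length = t.length + 1 := by simp
  rw [hlen]
  have h1 : (t ++ [c]).take (b + 1) = t.take (b + 1) := List.take_append_of_le_length (by omega)
  have h2 : t.take (b + 1) = t.take b ++ [t.getD b ' '] := by
    rw [List.take_add_one, List.getD_eq_getElem _ _ hlt]
    simp [List.getElem?_eq_getElem hlt]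
  have h3 : t.length + 1 - (b + 1) = t.length - b := by omega
  have h4 : (t ++ [c]).drop (t.length - b) = t.drop (t.length - b) ++ [c] :=
    List.drop_append_of_le_length (by omega)
  rw [h1, h2, h3, h4, heq, hc]

theorem isB_snoc_elim {t : List Char} {b : Nat} {c : Char}
    (h : IsB (t ++ [c]) (b + 1)) : IsB t b ∧ t.getD b ' ' = c := by
  obtain ⟨hlt, heq⟩ := h
  have hlen : (t ++ [c]).length = t.length + 1 := by simp
  rw [hlen] at hlt heq
  have hb : b < t.length := by omega
  have h1 : (t ++ [c]).take (b + 1) = t.take b ++ [t.getD b ' '] := by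
    rw [List.take_append_of_le_length (by omega), List.take_add_one,
      List.getD_eq_getElem _ _ hb]
    simp [List.getElem?_eq_getElem hb]
  have h3 : t.length + 1 - (b + 1) = t.length - b := by omega
  have h4 : (t ++ [c]).drop (t.length + 1 - (b + 1)) = t.drop (t.length - b) ++ [c] := by
    rw [h3]; exact List.drop_append_of_le_length (by omega)
  rw [h1, h4] at heq
  obtain ⟨e1, e2⟩ := List.append_inj' heq (by simp)
  refine ⟨⟨hb, e1⟩, by simpa using e2⟩

-- take (i+1) as snoc
theorem take_succ_eq {t : List Char} {i : Nat} (h : i < t.length) :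
    t.take (i + 1) = t.take i ++ [t.getD i ' '] := by
  rw [List.take_add_one, List.getD_eq_getElem _ _ h]
  simp [List.getElem?_eq_getElem h]

-- ===== while-loop correctness =====
theorem kmpWhile_succ (cs : List Char) (pi : List Int) (c : Char) (fuel : Nat) (j : Int) :
    kmpWhile cs pi c (fuel + 1) j =
      if (decide (j > 0) && (cs.getD j.toNat ' ' != c)) = true then
        kmpWhile cs pi c fuel (pi.getD (j.toNat - 1) 0)
      else j := rfl

theorem kmpWhile_spec (cs : List Char) (pi : List Int) (c : Char) (i : Nat)
    (hi : i ≤ cs.length)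
    (hpi : ∀ k, k < i → pi.getD k 0 = (lb (cs.take (k+1)) : Int)) :
    ∀ fuel j, j ≤ fuel →
      IsB (cs.take i) j →
      (∀ b, IsB (cs.take i) b → cs.getD b ' ' = c → b ≤ j) →
      ∃ r : Nat, kmpWhile cs pi c fuel (j : Int) = (r : Nat) ∧
        IsB (cs.take i) r ∧ (∀ b, IsB (cs.take i) b → cs.getD b ' ' = c → b ≤ r) ∧
        (r = 0 ∨ cs.getD r ' ' = c) := by
  intro fuel
  induction fuel with
  | zero =>
    intro j hj hB hmax
    have hj0 : j = 0 := by omega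
    subst hj0
    exact ⟨0, rfl, hB, hmax, Or.inl rfl⟩
  | succ fuel ih =>
    intro j hj hB hmax
    have hilen : (cs.take i).length = i := by simp [List.length_take]; omega
    have hji : j < i := by have := hB.1; omega
    by_cases hg : 0 < j ∧ cs.getD j ' ' ≠ c
    · -- guard true: one more iteration with j' = pi[j-1] = lb (cs.take j)
      have hstep : kmpWhile cs pi c (fuel + 1) (j : Int) =
          kmpWhile cs pi c fuel (pi.getD ((j : Int).toNat - 1) 0) := by
        rw [kmpWhile_succ, if_pos]
        rw [Bool.and_eq_true, decide_eq_true_iff, bne_iff_ne, Int.toNat_natCast]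
        exact ⟨by exact_mod_cast hg.1, hg.2⟩
      have hb2 : ((j : Int).toNat : Nat) = j := Int.toNat_natCast j
      have hpij : pi.getD ((j : Int).toNat - 1) 0 = (lb (cs.take j) : Int) := by
        rw [hb2]
        have := hpi (j - 1) (by omega)
        have hj1 : j - 1 + 1 = j := by omega
        rwa [hj1] at this
      rw [hstep, hpij]
      have hjlen : (cs.take j).length = j := by simp [List.length_take]; omega
      have htj : cs.take j = (cs.take i).take j := by rw [List.take_take]; congr 1; omega
      have hBj' : IsB (cs.take i) (lb (cs.take j)) := by
        have h1 : IsB ((cs.take i).take j) (lb (cs.take j)) := by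
          rw [← htj]; exact lb_isB (by omega)
        exact isB_lift h1 hB
      have hmax' : ∀ b, IsB (cs.take i) b → cs.getD b ' ' = c → b ≤ lb (cs.take j) := by
        intro b hBb hcb
        have hbj : b ≤ j := hmax b hBb hcb
        have hbne : b ≠ j := fun h => hg.2 (h ▸ hcb)
        have hblt : b < j := by omega
        have h2 : IsB (cs.take j) b := by
          rw [htj]; exact isB_restrict hBb hB hblt
        exact lb_ge h2
      have hfuel : lb (cs.take j) ≤ fuel := by
        have := lb_le (cs.take j)
        rw [hjlen] at this
        omega
      exact ih (lb (cs.take j)) hfuel hBj' hmax'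
    · -- guard false: loop exits with r = j
      refine ⟨j, ?_, hB, hmax, ?_⟩
      · rw [kmpWhile_succ, if_neg]
        rw [Bool.and_eq_true, decide_eq_true_iff, bne_iff_ne, Int.toNat_natCast]
        intro ⟨a, b⟩
        exact hg ⟨by exact_mod_cast a, b⟩
      · by_cases h0 : j = 0
        · exact Or.inl h0
        · right
          by_contra hc
          exact hg ⟨by omega, hc⟩

-- ===== step correctness =====
theorem kmpStep_spec (cs : List Char) (pi : List Int) (i : Nat)
    (h1 : 1 ≤ i) (h2 : i < cs.length) (hlen : pi.length = cs.length)
    (hpi : ∀ k, k < cs.length → pi.getD k 0 = if k < i then (lb (cs.take (k+1)) : Int) else 0) :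
    (kmpStep cs pi i).length = cs.length ∧
    (∀ k, k < cs.length → (kmpStep cs pi i).getD k 0 =
        if k < i + 1 then (lb (cs.take (k+1)) : Int) else 0) := by
  have hilen : (cs.take i).length = i := by simp [List.length_take]; omega
  have hpi' : ∀ k, k < i → pi.getD k 0 = (lb (cs.take (k+1)) : Int) := by
    intro k hk
    rw [hpi k (by omega), if_pos hk]
  have hj0 : pi.getD (i - 1) 0 = (lb (cs.take i) : Int) := by
    have h0 := hpi' (i - 1) (by omega)
    have h : i - 1 + 1 = i := by omega
    rwa [h] at h0
  have hB0 : IsB (cs.take i) (lb (cs.take i)) := lb_isB (by omega)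
  have hmax0 : ∀ b, IsB (cs.take i) b → cs.getD b ' ' = cs.getD i ' ' → b ≤ lb (cs.take i) :=
    fun b hb _ => lb_ge hb
  obtain ⟨r, hr, hBr, hmaxr, hend⟩ :=
    kmpWhile_spec cs pi (cs.getD i ' ') i (le_of_lt h2) hpi'
      (lb (cs.take i)) (lb (cs.take i)) le_rfl hB0 hmax0
  have hri : r < i := by have := hBr.1; omega
  have hrd : (cs.take i).getD r ' ' = cs.getD r ' ' := getD_take hri (le_of_lt h2)
  have htake : cs.take (i + 1) = cs.take i ++ [cs.getD i ' '] := take_succ_eq h2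
  have hkey : kmpStep cs pi i = pi.set i ((lb (cs.take (i + 1)) : Nat) : Int) := by
    unfold kmpStep
    simp only [hj0, Int.toNat_natCast, hr]
    by_cases hm : cs.getD r ' ' = cs.getD i ' '
    · rw [if_pos hm]
      have hlb : lb (cs.take (i + 1)) = r + 1 := by
        apply lb_eq
        · rw [htake]
          exact isB_snoc_intro hBr (by rw [hrd]; exact hm)
        · intro b' hb'
          match b' with
          | 0 => omega
          | b + 1 =>
            rw [htake] at hb'
            obtain ⟨hbt, hbc⟩ := isB_snoc_elim hb'
            have hbi : b < i := by have := hbt.1; omega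
            have : cs.getD b ' ' = cs.getD i ' ' := by
              rw [← getD_take hbi (le_of_lt h2)]; exact hbc
            have := hmaxr b hbt this
            omega
      rw [hlb]
      push_cast
      ring_nf
    · rw [if_neg hm]
      have hr0 : r = 0 := by
        rcases hend with h | h
        · exact h
        · exact absurd h hm
      have hlb : lb (cs.take (i + 1)) = 0 := by
        apply lb_eq
        · apply isB_zero
          simp [List.length_take]; omega
        · intro b' hb'
          match b' with
          | 0 => omega
          | b + 1 =>
            rw [htake] at hb'
            obtain ⟨hbt, hbc⟩ := isB_snoc_elim hb'
            have hbi : b < i := by have := hbt.1; omega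
            have hcb : cs.getD b ' ' = cs.getD i ' ' := by
              rw [← getD_take hbi (le_of_lt h2)]; exact hbc
            have hbr := hmaxr b hbt hcb
            have hb0 : b = 0 := by omega
            subst hb0
            rw [← hr0] at hcb
            exact absurd hcb hm
      rw [hlb, hr0]
  rw [hkey]
  constructor
  · rw [List.length_set]; exact hlen
  · intro k hk
    by_cases hki : k = i
    · subst hki
      rw [List.getD_eq_getElem _ _ (by rw [List.length_set]; omega), List.getElem_set_self]
      rw [if_pos (by omega)]
    · rw [List.getD_eq_getElem?_getD, List.getElem?_set_ne (fun h => hki h.symm),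
        ← List.getD_eq_getElem?_getD, hpi k hk]
      by_cases hk1 : k < i
      · rw [if_pos hk1, if_pos (by omega)]
      · rw [if_neg hk1, if_neg (by omega)]

-- ===== fold invariant =====
theorem fold_spec (cs : List Char) (h : 0 < cs.length) :
    ∀ m, m ≤ cs.length - 1 →
      ((List.range' 1 m).foldl (kmpStep cs) (List.replicate cs.length 0)).length = cs.length ∧
      (∀ k, k < cs.length →
        ((List.range' 1 m).foldl (kmpStep cs) (List.replicate cs.length 0)).getD k 0 =
          if k < m + 1 then (lb (cs.take (k+1)) : Int) else 0) := by
  intro m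
  induction m with
  | zero =>
    intro _
    refine ⟨by simp, ?_⟩
    intro k hk
    simp only [List.range'_zero, List.foldl_nil]
    rw [List.getD_replicate _ (by omega)]
    by_cases hk0 : k < 1
    · have hk1 : k = 0 := by omega
      subst hk1
      rw [if_pos (by omega)]
      have hlb1 : lb (cs.take 1) = 0 := by
        unfold lb
        have h1 : (cs.take 1).length - 1 = 0 := by rw [List.length_take]; omega
        rw [h1]
        rfl
      rw [hlb1]
      simp
    · rw [if_neg hk0]
  | succ m ih =>
    intro hm
    obtain ⟨ihlen, ihval⟩ := ih (by omega)
    have hconcat : List.range' 1 (m + 1) = List.range' 1 m ++ [1 + 1 * m] := List.range'_concat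
    rw [hconcat, List.foldl_append, List.foldl_cons, List.foldl_nil]
    have h1m : 1 + 1 * m = m + 1 := by omega
    rw [h1m]
    obtain ⟨slen, sval⟩ := kmpStep_spec cs _ (m + 1) (by omega) (by omega) ihlen
      (by intro k hk; rw [ihval k hk])
    refine ⟨slen, ?_⟩
    intro k hk
    rw [sval k hk]

-- ===== occurrence lemmas =====
-- an interior occurrence of the length-L prefix gives a prefix with big border, and back
theorem occ_to_lb {cs : List Char} {L j : Nat} (hL : 1 ≤ L) (hj : 1 ≤ j)
    (hjn : j + L ≤ cs.length) (hocc : (cs.drop j).take L = cs.take L) :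
    L ≤ lb (cs.take (j + L)) := by
  apply lb_ge
  have hlen : (cs.take (j + L)).length = j + L := by simp [List.length_take]; omega
  refine ⟨by omega, ?_⟩
  rw [hlen]
  have h1 : (cs.take (j + L)).take L = cs.take L := by
    rw [List.take_take]; congr 1; omega
  have h2 : j + L - L = j := by omega
  rw [h1, h2, List.drop_take]
  have h3 : j + L - j = L := by omega
  rw [h3, hocc]

theorem lb_to_occ {cs : List Char} {L i : Nat} (hL : 1 ≤ L) (hi : i + 1 ≤ cs.length)
    (hlb : L ≤ lb (cs.take (i + 1))) :
    ∃ j, 1 ≤ j ∧ j + L ≤ i + 1 ∧ (cs.drop j).take L = cs.take L := by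
  have hlen : (cs.take (i + 1)).length = i + 1 := by simp [List.length_take]; omega
  have hpos : 0 < (cs.take (i + 1)).length := by omega
  obtain ⟨hblt, hbeq⟩ := lb_isB hpos
  set b := lb (cs.take (i + 1)) with hbdef
  rw [hlen] at hblt hbeq
  refine ⟨i + 1 - b, by omega, by omega, ?_⟩
  have e1 : (cs.take (i + 1)).take b = cs.take b := by rw [List.take_take]; congr 1; omega
  have e2 : (cs.take (i + 1)).drop (i + 1 - b) = (cs.drop (i + 1 - b)).take b := by
    rw [List.drop_take]; congr 1; omega
  rw [e1, e2] at hbeq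
  have e4 : (cs.drop (i + 1 - b)).take L = ((cs.drop (i + 1 - b)).take b).take L := by
    rw [List.take_take]; congr 1; omega
  rw [e4, ← hbeq, List.take_take]
  congr 1; omega

-- altOk characterized
theorem altOk_iff {cs : List Char} {L : Nat} (hL : 1 ≤ L) (_hLn : L ≤ cs.length - 1)
    (hn : 0 < cs.length) :
    altOk cs cs.length L = true ↔
      (IsB cs L ∧ ∃ i, i < cs.length - 1 ∧ L ≤ lb (cs.take (i + 1))) := by
  unfold altOk
  rw [Bool.and_eq_true, beq_iff_eq, List.any_eq_true]
  constructor
  · rintro ⟨h1, j, hj, h2⟩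
    rw [List.mem_range'_1] at hj
    rw [beq_iff_eq] at h2
    have hjL : j + L ≤ cs.length - 1 := by omega
    refine ⟨⟨by omega, h1⟩, j + L - 1, by omega, ?_⟩
    have : j + L - 1 + 1 = j + L := by omega
    rw [this]
    exact occ_to_lb hL hj.1 (by omega) h2
  · rintro ⟨⟨_, h1⟩, i, hi, h2⟩
    refine ⟨h1, ?_⟩
    obtain ⟨j, hj1, hj2, hj3⟩ := lb_to_occ hL (by omega) h2
    refine ⟨j, ?_, by rw [beq_iff_eq]; exact hj3⟩
    rw [List.mem_range'_1]
    omega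

-- find? over the reversed range: first (greatest) satisfying element
theorem find?_rev_range'_eq_some {q : Nat → Bool} {k M : Nat} (h1 : 1 ≤ M) (h2 : M ≤ k)
    (hq : q M = true) (hgt : ∀ L, M < L → L ≤ k → q L = false) :
    (List.range' 1 k).reverse.find? q = some M := by
  induction k with
  | zero => omega
  | succ k ih =>
    rw [List.range'_concat, List.reverse_append, List.reverse_singleton, List.singleton_append]
    have hval : 1 + 1 * k = k + 1 := by omega
    rw [hval]
    by_cases hM : M = k + 1
    · subst hM; exact List.find?_cons_of_pos hq
    · have hq' : q (k + 1) = false := hgt _ (by omega) (by omega)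
      rw [List.find?_cons_of_neg (by simp [hq'])]
      exact ih (by omega) (fun L h1 h2 => hgt L h1 (by omega))

theorem find?_rev_range'_eq_none {q : Nat → Bool} {k : Nat}
    (h : ∀ L, 1 ≤ L → L ≤ k → q L = false) :
    (List.range' 1 k).reverse.find? q = none := by
  rw [List.find?_eq_none]
  intro x hx
  rw [List.mem_reverse, List.mem_range'_1] at hx
  simp [h x hx.1 (by omega)]

theorem solve_prefix_spec : Claim_equal_solve_prefix := by
  intro s _ hp
  unfold Spec_solve_prefix
  have hne : s.toList ≠ [] := fun h => hp (String.toList_eq_nil_iff.mp h)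
  have hn : 0 < s.toList.length := List.length_pos_of_ne_nil hne
  set cs := s.toList with hcs
  obtain ⟨plen, pval⟩ := fold_spec cs hn (cs.length - 1) le_rfl
  set P := (List.range' 1 (cs.length - 1)).foldl (kmpStep cs) (List.replicate cs.length 0)
    with hPdef
  have pval' : ∀ k, k < cs.length → P.getD k 0 = (lb (cs.take (k + 1)) : Int) := by
    intro k hk
    rw [pval k hk, if_pos (by omega)]
  have hlast : P.getD (cs.length - 1) 0 = (lb cs : Int) := by
    rw [pval' _ (by omega)]
    have h1 : cs.length - 1 + 1 = cs.length := by omega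
    rw [h1, List.take_length]
  have hany : ((List.range (cs.length - 1)).any
      (fun i => P.getD i 0 ≥ (lb cs : Int))) = true ↔
      (∃ i, i < cs.length - 1 ∧ lb cs ≤ lb (cs.take (i + 1))) := by
    rw [List.any_eq_true]
    constructor
    · rintro ⟨i, hi, hdec⟩
      rw [List.mem_range] at hi
      rw [decide_eq_true_iff, pval' i (by omega)] at hdec
      exact ⟨i, hi, by exact_mod_cast hdec⟩
    · rintro ⟨i, hi, hle⟩
      refine ⟨i, List.mem_range.mpr hi, ?_⟩
      rw [decide_eq_true_iff, pval' i (by omega)]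
      exact_mod_cast hle
  unfold solve_prefix solve_prefix_alt
  dsimp only
  rw [← hcs, ← hPdef, hlast]
  -- case analysis on the longest border A = lb cs
  by_cases hA0 : lb cs = 0
  · -- no border at all: both sides 'Just a legend'
    have hBnone : (List.range' 1 (cs.length - 1)).reverse.find? (altOk cs cs.length) = none := by
      apply find?_rev_range'_eq_none
      intro L h1 h2
      by_contra hc
      have ht : altOk cs cs.length L = true := by
        cases h : altOk cs cs.length L
        · exact absurd h hc
        · rfl
      have := ((altOk_iff h1 h2 hn).mp ht).1
      have := lb_ge this
      omega
    rw [hBnone, hA0]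
    norm_num
  · have hApos : 0 < lb cs := by omega
    rw [if_pos (by exact_mod_cast hApos)]
    have hAn1 : lb cs ≤ cs.length - 1 := lb_le cs
    by_cases hOcc : ∃ i, i < cs.length - 1 ∧ lb cs ≤ lb (cs.take (i + 1))
    · -- the longest border occurs inside: both sides return s[:lb cs]
      have hBsome : (List.range' 1 (cs.length - 1)).reverse.find? (altOk cs cs.length) =
          some (lb cs) := by
        apply find?_rev_range'_eq_some hApos hAn1
        · rw [altOk_iff hApos hAn1 hn]
          exact ⟨lb_isB hn, hOcc⟩
        · intro L hL1 hL2
          cases h : altOk cs cs.length L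
          · rfl
          · have := ((altOk_iff (by omega) hL2 hn).mp h).1
            have := lb_ge this
            omega
      rw [hBsome]
      have hany' := hany.mpr hOcc
      rw [hany']
      simp only [if_pos, Int.toNat_natCast]
    · have hany' : ((List.range (cs.length - 1)).any
          (fun i => P.getD i 0 ≥ (lb cs : Int))) = false := by
        cases h : (List.range (cs.length - 1)).any
            (fun i => P.getD i 0 ≥ (lb cs : Int))
        · rfl
        · exact absurd (hany.mp h) hOcc
      rw [hany']
      rw [if_neg (by simp)]
      have hp2 : P.getD ((lb cs : Int).toNat - 1) 0 = (lb (cs.take (lb cs)) : Int) := by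
        rw [Int.toNat_natCast, pval' _ (by omega)]
        have h1 : lb cs - 1 + 1 = lb cs := by omega
        rw [h1]
      rw [hp2]
      set p := lb (cs.take (lb cs)) with hpdef
      have hAlen : (cs.take (lb cs)).length = lb cs := by rw [List.length_take]; omega
      have hple : p ≤ lb cs - 1 := by
        have := lb_le (cs.take (lb cs))
        rw [hAlen] at this
        omega
      -- no border between p and lb cs, and lb cs itself does not occur inside
      have hnot : ∀ L, p < L → L ≤ cs.length - 1 → altOk cs cs.length L = false := by
        intro L hL1 hL2
        cases h : altOk cs cs.length L
        · rfl
        · exfalso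
          obtain ⟨hBL, hOL⟩ := (altOk_iff (by omega) hL2 hn).mp h
          have hLle : L ≤ lb cs := lb_ge hBL
          rcases Nat.lt_or_ge L (lb cs) with hlt | hge
          · have := lb_ge (isB_restrict hBL (lb_isB hn) hlt)
            omega
          · have hLeq : L = lb cs := by omega
            rw [hLeq] at hOL
            exact hOcc hOL
      by_cases hppos : 0 < p
      · -- fall back to the second border p: both sides return s[:p]
        rw [if_pos (by exact_mod_cast hppos)]
        have hBsome : (List.range' 1 (cs.length - 1)).reverse.find? (altOk cs cs.length) =
            some p := by
          apply find?_rev_range'_eq_some hppos (by omega)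
          · rw [altOk_iff hppos (by omega) hn]
            refine ⟨isB_lift (lb_isB (by omega)) (lb_isB hn), lb cs - 1, by omega, ?_⟩
            have h1 : lb cs - 1 + 1 = lb cs := by omega
            rw [h1]
          · exact hnot
        rw [hBsome, Int.toNat_natCast]
      · -- no usable border: both sides 'Just a legend'
        have hp0 : p = 0 := by omega
        rw [if_neg (by exact_mod_cast hppos)]
        have hBnone : (List.range' 1 (cs.length - 1)).reverse.find? (altOk cs cs.length) =
            none := by
          apply find?_rev_range'_eq_none
          intro L h1 h2
          exact hnot L (by omega) h2
        rw [hBnone]
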